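-- pv_equiv track=rewrite | github.com/BrettRey/hpc-book | code/audit_cited_bib.py | make_case_suggestions
-- ===== SOURCE A (Python) =====
-- from collections import defaultdict
-- from typing import Dict, Iterable, List, Sequence, Tuple
--
-- def make_case_suggestions(missing_keys: Sequence[str], known_keys: Iterable[str]) -> Dict[str, List[str]]:
--     lower_map: Dict[str, List[str]] = defaultdict(list)
--     for key in known_keys:
--         lower_map[key.lower()].append(key)
--
--     suggestions: Dict[str, List[str]] = {}
--     for key in missing_keys:
--         near = lower_map.get(key.lower(), [])
--         if near:
--             suggestions[key] = near
--     return suggestions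
-- ===== SOURCE B (Python) =====
-- def make_case_suggestions(missing_keys, known_keys):
--     known = list(known_keys)
--     pairs = []
--     seen = set()
--     for key in missing_keys:
--         if key in seen:
--             continue
--         seen.add(key)
--         near = [k for k in known if k.lower() == key.lower()]
--         if near:
--             pairs.append((key, near))
--     return dict(pairs)
-- ===== Notes on version B (the rewrite author's own statement) =====
-- stated objective: alternative
-- what changed: B builds no lowercase index and no dict during the loop: it deduplicates the missing keys with a seen-set, scans the materialized known_keys list once per new missing key with a filter comprehension, accumulates (key, matches) pairs in a plain list, and converts to a dict only at the end.
import Mathlib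
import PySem

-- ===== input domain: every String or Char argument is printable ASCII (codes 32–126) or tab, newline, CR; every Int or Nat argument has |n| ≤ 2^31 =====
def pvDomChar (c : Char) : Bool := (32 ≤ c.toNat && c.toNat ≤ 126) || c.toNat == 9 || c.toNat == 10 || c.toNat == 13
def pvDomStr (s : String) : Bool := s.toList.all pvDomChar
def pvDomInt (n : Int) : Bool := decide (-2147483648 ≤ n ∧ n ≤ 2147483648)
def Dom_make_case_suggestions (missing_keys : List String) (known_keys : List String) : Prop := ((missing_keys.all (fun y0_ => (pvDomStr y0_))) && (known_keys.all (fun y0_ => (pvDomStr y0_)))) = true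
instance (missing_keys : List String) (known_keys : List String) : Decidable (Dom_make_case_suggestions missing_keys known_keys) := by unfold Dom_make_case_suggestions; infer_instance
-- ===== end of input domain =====

-- B replaces A's lowercase-index-then-dict pipeline with a seen-set deduplicating loop that
-- scans known_keys per new missing key and accumulates plain (key, matches) pairs (objective: alternative).

-- ===== PORT A =====
def make_case_suggestions (missing_keys : List String) (known_keys : List String) : List (String × List String) :=
  let lower_map : PySem.Dict String (List String) :=
    known_keys.foldl (fun d key => d.modify (PySem.Str.lower key) [] (· ++ [key])) PySem.Dict.empty
  let suggestions : PySem.Dict String (List String) :=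
    missing_keys.foldl (fun d key =>
      let near := lower_map.getD (PySem.Str.lower key) []
      if near.isEmpty then d else d.insert key near) PySem.Dict.empty
  suggestions.items

-- ===== PORT B =====
def make_case_suggestions_alt (missing_keys : List String) (known_keys : List String) : List (String × List String) :=
  let known := known_keys
  let final : List (String × List String) × PySem.Set String :=
    missing_keys.foldl (fun st key =>
      if PySem.Set.contains st.2 key then st
      else
        let seen := PySem.Set.add st.2 key
        let near := known.filter (fun k => PySem.Str.lower k == PySem.Str.lower key)
        ((if near.isEmpty then st.1 else st.1 ++ [(key, near)]), seen))
      ([], PySem.Set.empty)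
  (PySem.Dict.ofList final.1).items

-- ===== PRECONDITION & SPEC =====
def Spec_make_case_suggestions (missing_keys : List String) (known_keys : List String) (out : List (String × List String)) : Prop := out = make_case_suggestions_alt missing_keys known_keys
instance (missing_keys : List String) (known_keys : List String) (out : List (String × List String)) : Decidable (Spec_make_case_suggestions missing_keys known_keys out) := by unfold Spec_make_case_suggestions; infer_instance

-- ===== CLAIM (what is proved, stated in full; the proofs are below) =====
def Claim_equal_make_case_suggestions : Prop := ∀ (missing_keys : List String) (known_keys : List String), Dom_make_case_suggestions missing_keys known_keys → Spec_make_case_suggestions missing_keys known_keys (make_case_suggestions missing_keys known_keys)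

-- ===== LEMMAS AND PROOFS =====

-- A's lowercase index, looked up at (lower key) with default [], is exactly B's per-key filter of known_keys.
theorem lower_map_getD (known_keys : List String) (c : String) :
    (known_keys.foldl (fun d key => d.modify (PySem.Str.lower key) [] (· ++ [key]))
      (PySem.Dict.empty : PySem.Dict String (List String))).getD c []
      = known_keys.filter (fun k => PySem.Str.lower k == c) := by
  have h := PySem.Dict.getD_foldl_modify_append
    (l := known_keys.map (fun k => (PySem.Str.lower k, k)))
    (d := (PySem.Dict.empty : PySem.Dict String (List String))) (c := c)
  rw [List.foldl_map] at h
  simpa [List.filter_map, List.map_map, Function.comp_def] using h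

-- Inserting a key with the value it already has leaves the dict unchanged.
theorem insert_self_eq (d : PySem.Dict String (List String)) (k : String) (v : List String)
    (hnd : d.keys.Nodup) (h : d.get? k = some v) : d.insert k v = d := by
  apply PySem.Dict.ext
  have hc : d.contains k = true := by
    rw [PySem.Dict.contains_eq_isSome_get?, h]; rfl
  rw [PySem.Dict.items_insert_of_contains d v hc]
  conv_rhs => rw [← List.map_id d.items]
  apply List.map_congr_left
  intro p hp
  obtain ⟨a, b⟩ := p
  by_cases hk : a = k
  · subst hk
    have hg := PySem.Dict.get?_of_mem_items d hp hnd
    rw [h] at hg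
    simp only [Option.some.injEq] at hg
    simp [hg]
  · simp [hk]

-- near-value of a missing key
def pvNear (known : List String) (key : String) : List String :=
  known.filter (fun k => PySem.Str.lower k == PySem.Str.lower key)

-- Core loop correspondence: A's dict-insert loop and B's (pairs, seen) loop stay in step.
theorem loop_eq (known : List String) :
    ∀ (keys : List String) (d : PySem.Dict String (List String))
      (pairs : List (String × List String)) (seen : PySem.Set String),
    d.items = pairs →
    d.keys.Nodup →
    (∀ k, (PySem.Set.contains seen k = true →
            ((pvNear known k).isEmpty = true ∨ d.get? k = some (pvNear known k))) ∧
          (PySem.Set.contains seen k = false → d.contains k = false)) →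
    (keys.foldl (fun d key =>
        let near := pvNear known key
        if near.isEmpty then d else d.insert key near) d).items
      = (keys.foldl (fun st key =>
          if PySem.Set.contains st.2 key then st
          else
            ((if (pvNear known key).isEmpty then st.1 else st.1 ++ [(key, pvNear known key)]),
              PySem.Set.add st.2 key)) (pairs, seen)).1 := by
  intro keys
  induction keys with
  | nil => intro d pairs seen hitems _ _; simpa using hitems
  | cons key rest ih =>
    intro d pairs seen hitems hnd hinv
    simp only [List.foldl_cons]
    by_cases hs : PySem.Set.contains seen key = true
    · -- key already seen: both sides leave state unchanged
      have hA : (if (pvNear known key).isEmpty then d else d.insert key (pvNear known key)) = d := by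
        rcases (hinv key).1 hs with he | hg
        · simp [he]
        · by_cases hne : (pvNear known key).isEmpty
          · simp [hne]
          · simp [hne, insert_self_eq d key (pvNear known key) hnd hg]
      simp only [hs, if_pos, hA]
      exact ih d pairs seen hitems hnd hinv
    · -- fresh key
      have hs' : PySem.Set.contains seen key = false := by simpa using hs
      have hdc : d.contains key = false := (hinv key).2 hs'
      have hcontains_add : ∀ k, PySem.Set.contains (PySem.Set.add seen key) k =
          (PySem.Set.contains seen k || k == key) := by
        intro k
        have hmem : key ∉ seen := by simpa [PySem.Set.contains] using hs'
        by_cases hk : k = key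
        · subst hk
          simp [PySem.Set.add, PySem.Set.contains, hmem]
        · simp [PySem.Set.add, PySem.Set.contains, hmem, hk]
      by_cases hne : (pvNear known key).isEmpty
      · -- no near matches: A skips, B only records key in seen
        simp only [hs, hne, if_pos]
        apply ih d pairs (PySem.Set.add seen key) hitems hnd
        intro k
        constructor
        · intro hk
          rw [hcontains_add k] at hk
          rcases Bool.or_eq_true_iff.mp hk with h1 | h1
          · exact (hinv k).1 h1
          · left; simpa [eq_of_beq (α := String) h1] using hne
        · intro hk
          rw [hcontains_add k] at hk
          have := Bool.or_eq_false_iff.mp hk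
          exact (hinv k).2 this.1
      · -- near matches: A inserts (appending, since key is fresh), B appends the pair
        simp only [hs, hne]
        apply ih (d.insert key (pvNear known key)) (pairs ++ [(key, pvNear known key)])
          (PySem.Set.add seen key)
        · rw [PySem.Dict.items_insert_of_not_contains d _ hdc, hitems]
        · exact PySem.Dict.nodup_keys_insert d key _ hnd
        · intro k
          constructor
          · intro hk
            by_cases hkk : k = key
            · right; subst hkk; exact PySem.Dict.get?_insert_self d k _
            · rw [hcontains_add k] at hk
              have h1 : PySem.Set.contains seen k = true := by
                rcases Bool.or_eq_true_iff.mp hk with h1 | h1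
                · exact h1
                · exact absurd (eq_of_beq h1) hkk
              rcases (hinv k).1 h1 with he | hg
              · exact Or.inl he
              · right; rw [PySem.Dict.get?_insert_of_ne d _ hkk]; exact hg
          · intro hk
            rw [hcontains_add k] at hk
            have h2 := Bool.or_eq_false_iff.mp hk
            have hkk : k ≠ key := by
              intro h; rw [h] at h2; simp at h2
            rw [PySem.Dict.contains_eq_isSome_get?, PySem.Dict.get?_insert_of_ne d _ hkk,
              ← PySem.Dict.contains_eq_isSome_get?]
            exact (hinv k).2 h2.1

-- dict(pairs) on pairs with distinct keys returns exactly those pairs.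
theorem ofList_items_of_nodup (pairs : List (String × List String))
    (hnd : (pairs.map Prod.fst).Nodup) :
    (PySem.Dict.ofList pairs).items = pairs := by
  have h := PySem.Dict.items_foldl_insert_fresh (l := pairs) (k := Prod.fst) (v := Prod.snd)
    (d := (PySem.Dict.empty : PySem.Dict String (List String)))
    (by intro a _; simp [PySem.Dict.contains_empty]) hnd
  simpa [PySem.Dict.ofList, PySem.Dict.update, PySem.Dict.items] using h

-- A's loop keeps the dict's keys distinct.
theorem nodup_keys_A (known : List String) (keys : List String)
    (d : PySem.Dict String (List String)) (h : d.keys.Nodup) :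
    (keys.foldl (fun d key =>
        let near := pvNear known key
        if near.isEmpty then d else d.insert key near) d).keys.Nodup := by
  induction keys generalizing d with
  | nil => exact h
  | cons key rest ih =>
    simp only [List.foldl_cons]
    by_cases hne : (pvNear known key).isEmpty
    · simpa [hne] using ih d h
    · simpa [hne] using ih _ (PySem.Dict.nodup_keys_insert d key _ h)

theorem make_case_suggestions_spec : Claim_equal_make_case_suggestions := by
  intro missing_keys known_keys _
  unfold Spec_make_case_suggestions make_case_suggestions make_case_suggestions_alt
  simp only [lower_map_getD]
  have hinv : ∀ k : String,
      (PySem.Set.contains PySem.Set.empty k = true →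
        ((pvNear known_keys k).isEmpty = true ∨
          (PySem.Dict.empty : PySem.Dict String (List String)).get? k = some (pvNear known_keys k))) ∧
      (PySem.Set.contains PySem.Set.empty k = false →
        (PySem.Dict.empty : PySem.Dict String (List String)).contains k = false) := by
    intro k
    refine ⟨fun hk => ?_, fun _ => ?_⟩
    · simp [PySem.Set.contains, PySem.Set.empty] at hk
    · simp [PySem.Dict.contains_empty]
  have hmain := loop_eq known_keys missing_keys PySem.Dict.empty [] PySem.Set.empty rfl
    (by simp) hinv
  have hnodA := nodup_keys_A known_keys missing_keys
    (PySem.Dict.empty : PySem.Dict String (List String)) (by simp)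
  simp only [pvNear] at hmain hnodA
  rw [hmain, ofList_items_of_nodup]
  rw [← hmain]
  simpa [PySem.Dict.keys] using hnodA
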